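-- pv_equiv track=rewrite | github.com/vinchinzu/euler | python/715.py | sum_powers
-- ===== SOURCE A (Python) =====
-- def sum_powers(n: int, k: int, mod: int) -> int:
--     """Sum of k-th powers from 1 to n mod mod."""
--     if k == 0:
--         return n % mod
--     if k == 1:
--         return (n * (n + 1) // 2) % mod
--     if k == 2:
--         return (n * (n + 1) * (2 * n + 1) // 6) % mod
--     if k == 3:
--         # Sum of cubes: (n(n+1)/2)^2
--         s = (n * (n + 1) // 2) % mod
--         return (s * s) % mod
--     # For higher powers, compute directly
--     result = 0
--     for i in range(1, n + 1):
--         result = (result + pow(i, k, mod)) % mod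
--     return result
-- ===== SOURCE B (Python) =====
-- def sum_powers(n: int, k: int, mod: int) -> int:
--     """Sum of k-th powers from 1 to n mod mod."""
--     if k < 0:
--         raise ValueError("k must be non-negative")
--     if k <= 3:
--         # Faulhaber closed forms, all built from the triangular number t.
--         if k == 0:
--             return n % mod
--         t = n * (n + 1) // 2
--         if k == 1:
--             return t % mod
--         if k == 2:
--             return (t * (2 * n + 1) // 3) % mod
--         return (t * t) % mod
--     # Higher powers: i**k mod `mod` depends only on i mod |mod|, so bucket
--     # the range 1..n into full blocks of |mod| consecutive integers (each
--     # block contributes the same block sum) plus one partial block.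
--     if n < 1:
--         return 0
--     mm = abs(mod)
--     q, r = divmod(n, mm)
--     total = sum(pow(i, k, mod) for i in range(1, r + 1))
--     if q:
--         total += q * sum(pow(i, k, mod) for i in range(1, mm + 1))
--     return total % mod
-- ===== Notes on version B (the rewrite author's own statement) =====
-- stated objective: alternative
-- what changed: For k >= 4 the per-element loop of modular powers is replaced by residue bucketing: i**k mod m depends only on i mod |mod|, so the range 1..n is one partial block plus q identical full blocks of |mod| consecutive bases; the k <= 3 closed forms are rebuilt from a shared triangular number.
-- outside the precondition, e.g. on sum_powers(7, -1, 5): A raises ValueError, B raises ValueError; on sum_powers(2, -1, 5): A returns 4, B raises ValueError; on sum_powers(3, 4, 0): A raises ValueError, B raises ZeroDivisionError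
import Mathlib
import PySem

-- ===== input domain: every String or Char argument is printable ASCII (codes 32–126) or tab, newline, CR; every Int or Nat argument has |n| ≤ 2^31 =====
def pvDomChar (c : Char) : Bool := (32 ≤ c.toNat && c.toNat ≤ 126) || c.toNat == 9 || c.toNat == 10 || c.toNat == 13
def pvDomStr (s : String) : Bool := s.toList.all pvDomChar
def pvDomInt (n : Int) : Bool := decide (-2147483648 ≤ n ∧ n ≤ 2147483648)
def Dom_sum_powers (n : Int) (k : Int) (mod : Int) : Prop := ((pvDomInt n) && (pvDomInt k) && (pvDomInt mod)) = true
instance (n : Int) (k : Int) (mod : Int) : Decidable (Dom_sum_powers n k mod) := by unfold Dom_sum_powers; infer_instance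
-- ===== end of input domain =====

-- B (alternative algorithm): for k ≥ 4 A's per-element modular-power loop is
-- replaced by residue bucketing — i^k mod m depends only on i mod |mod|, so
-- 1..n is one partial block plus q identical full blocks of |mod| bases.

-- ===== PORT A =====
def sum_powers (n : Int) (k : Int) (mod : Int) : Int :=
  if k = 0 then PySem.Int.mod n mod
  else if k = 1 then PySem.Int.mod (PySem.Int.floordiv (n * (n + 1)) 2) mod
  else if k = 2 then PySem.Int.mod (PySem.Int.floordiv (n * (n + 1) * (2 * n + 1)) 6) mod
  else if k = 3 then
    let s := PySem.Int.mod (PySem.Int.floordiv (n * (n + 1)) 2) mod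
    PySem.Int.mod (s * s) mod
  else
    (PySem.List.pyRange 1 (n + 1) 1).foldl
      (fun result i => PySem.Int.mod (result + PySem.Int.powMod i k.toNat mod) mod) 0

-- ===== PORT B =====
def sum_powers_alt (n : Int) (k : Int) (mod : Int) : Int :=
  if k < 0 then 0  -- Python B raises ValueError here; outside Pre_
  else if k ≤ 3 then
    if k = 0 then PySem.Int.mod n mod
    else
      let t := PySem.Int.floordiv (n * (n + 1)) 2
      if k = 1 then PySem.Int.mod t mod
      else if k = 2 then PySem.Int.mod (PySem.Int.floordiv (t * (2 * n + 1)) 3) mod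
      else PySem.Int.mod (t * t) mod
  else if n < 1 then 0
  else
    let mm : Int := |mod|
    let q : Int := PySem.Int.floordiv n mm
    let r : Int := PySem.Int.mod n mm
    let total : Int :=
      ((PySem.List.pyRange 1 (r + 1) 1).map (fun i => PySem.Int.powMod i k.toNat mod)).sum
    let total2 : Int :=
      if q ≠ 0 then
        total + q * ((PySem.List.pyRange 1 (mm + 1) 1).map
          (fun i => PySem.Int.powMod i k.toNat mod)).sum
      else total
    PySem.Int.mod total2 mod

-- ===== PRECONDITION & SPEC =====
-- Pre_ excludes mod = 0 (A raises ZeroDivisionError/ValueError) and k < 0 (A raises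
-- ValueError at the first base not coprime to mod; where it does return, it returns
-- sums of modular inverses, which B refuses with ValueError).
def Pre_sum_powers (n : Int) (k : Int) (mod : Int) : Prop := 0 ≤ k ∧ mod ≠ 0
instance (n : Int) (k : Int) (mod : Int) : Decidable (Pre_sum_powers n k mod) := by
  unfold Pre_sum_powers; infer_instance
def pvWitness_sum_powers : Int × Int × Int := (10, 4, 7)

def Spec_sum_powers (n : Int) (k : Int) (mod : Int) (out : Int) : Prop := out = sum_powers_alt n k mod
instance (n : Int) (k : Int) (mod : Int) (out : Int) : Decidable (Spec_sum_powers n k mod out) := by unfold Spec_sum_powers; infer_instance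

-- ===== CLAIM (what is proved, stated in full; the proofs are below) =====
def Claim_equal_sum_powers : Prop := ∀ (n : Int) (k : Int) (mod : Int), Dom_sum_powers n k mod → Pre_sum_powers n k mod → Spec_sum_powers n k mod (sum_powers n k mod)

-- ===== LEMMAS AND PROOFS =====

-- Python's a % m is congruent to a modulo m.
theorem pymod_modeq_self (x m : Int) : PySem.Int.mod x m ≡ x [ZMOD m] := by
  refine Int.modEq_iff_dvd.mpr ⟨PySem.Int.floordiv x m, ?_⟩
  have h := PySem.Int.floordiv_mul_add_mod x m
  linarith [mul_comm (PySem.Int.floordiv x m) m]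

-- Python's % only depends on the residue class of its left argument.
theorem pymod_eq_of_modeq {x y m : Int} (hm : m ≠ 0) (h : x ≡ y [ZMOD m]) :
    PySem.Int.mod x m = PySem.Int.mod y m := by
  rcases lt_or_gt_of_ne hm with hneg | hpos
  · have e1 : PySem.Int.mod x m = -PySem.Int.mod (-x) (-m) := by
      simpa using (PySem.Int.mod_neg_neg (-x) (-m)).symm
    have e2 : PySem.Int.mod y m = -PySem.Int.mod (-y) (-m) := by
      simpa using (PySem.Int.mod_neg_neg (-y) (-m)).symm
    have hpos' : (0 : Int) < -m := by omega
    have h' : -x ≡ -y [ZMOD -m] := by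
      refine Int.modEq_iff_dvd.mpr ?_
      have hd : m ∣ y - x := Int.modEq_iff_dvd.mp h
      have h2 : -m ∣ -(y - x) := neg_dvd.mpr (dvd_neg.mpr hd)
      have h3 : -y - -x = -(y - x) := by ring
      rw [h3]; exact h2
    rw [e1, e2, PySem.Int.mod_eq_emod_of_pos hpos', PySem.Int.mod_eq_emod_of_pos hpos']
    rw [h']
  · rw [PySem.Int.mod_eq_emod_of_pos hpos, PySem.Int.mod_eq_emod_of_pos hpos]
    exact h

theorem powmod_modeq (i : Int) (K : Nat) (m : Int) :
    PySem.Int.powMod i K m ≡ i ^ K [ZMOD m] := by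
  rw [PySem.Int.powMod_eq]; exact pymod_modeq_self _ _

theorem sum_map_powmod_modeq (K : Nat) (m : Int) :
    ∀ l : List Int,
      ((l.map (fun i => PySem.Int.powMod i K m)).sum) ≡ ((l.map (fun i => i ^ K)).sum) [ZMOD m] := by
  intro l
  induction l with
  | nil => rfl
  | cons a l ih => simpa using (powmod_modeq a K m).add ih

-- exact sum of k-th powers of 1..t
def psum (K t : Nat) : Int := ((List.range t).map (fun j : Nat => ((j : Int) + 1) ^ K)).sum

theorem psum_succ (K t : Nat) : psum K (t + 1) = psum K t + ((t : Int) + 1) ^ K := by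
  simp [psum, List.range_succ]

theorem pyRange_pow_sum (K : Nat) (t : Int) (ht : 0 ≤ t) :
    ((PySem.List.pyRange 1 (t + 1) 1).map (fun i => i ^ K)).sum = psum K t.toNat := by
  rw [PySem.List.pyRange_one]
  have h1 : (t + 1 - 1).toNat = t.toNat := by omega
  rw [h1, List.map_map]
  unfold psum
  refine congrArg List.sum (List.map_congr_left fun j _ => ?_)
  simp only [Function.comp]
  ring

theorem foldl_pymod (K : Nat) (m : Int) (hm : m ≠ 0) :
    ∀ (l : List Int) (a : Int),
      l.foldl (fun res i => PySem.Int.mod (res + PySem.Int.powMod i K m) m) (PySem.Int.mod a m)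
        = PySem.Int.mod (a + (l.map (fun i => i ^ K)).sum) m := by
  intro l
  induction l with
  | nil => intro a; simp
  | cons i l ih =>
      intro a
      have hstep : PySem.Int.mod (PySem.Int.mod a m + PySem.Int.powMod i K m) m
          = PySem.Int.mod (a + i ^ K) m :=
        pymod_eq_of_modeq hm ((pymod_modeq_self a m).add (powmod_modeq i K m))
      simp only [List.foldl_cons, hstep, ih, List.map_cons, List.sum_cons]
      ring_nf

theorem foldl_pymod_zero (K : Nat) (m : Int) (hm : m ≠ 0) (l : List Int) :
    l.foldl (fun res i => PySem.Int.mod (res + PySem.Int.powMod i K m) m) 0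
      = PySem.Int.mod ((l.map (fun i => i ^ K)).sum) m := by
  have h0 : PySem.Int.mod (0 : Int) m = 0 := by simp [PySem.Int.mod]
  have h := foldl_pymod K m hm l 0
  rw [h0] at h
  rw [h, zero_add]

theorem psum_add_block (K M : Nat) :
    ∀ x : Nat, psum K (x + M) ≡ psum K x + psum K M [ZMOD (M : Int)] := by
  intro x
  induction x with
  | zero => simp [psum]
  | succ x ih =>
      have hshift : ((x : Int) + (M : Int) + 1) ^ K ≡ ((x : Int) + 1) ^ K [ZMOD (M : Int)] :=
        (Int.modEq_iff_dvd.mpr ⟨-1, by ring⟩).pow K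
      have : psum K (x + 1 + M) = psum K (x + M) + ((x : Int) + (M : Int) + 1) ^ K := by
        have h1 : x + 1 + M = (x + M) + 1 := by omega
        rw [h1, psum_succ]; push_cast; ring_nf
      rw [this, psum_succ]
      calc psum K (x + M) + ((x : Int) + (M : Int) + 1) ^ K
          ≡ (psum K x + psum K M) + ((x : Int) + 1) ^ K [ZMOD (M : Int)] := ih.add hshift
        _ = psum K x + ((x : Int) + 1) ^ K + psum K M := by ring

theorem psum_blocks (K M : Nat) :
    ∀ (q s : Nat), psum K (q * M + s) ≡ (q : Int) * psum K M + psum K s [ZMOD (M : Int)] := by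
  intro q
  induction q with
  | zero => intro s; simp
  | succ q ih =>
      intro s
      have h1 : (q + 1) * M + s = (q * M + s) + M := by ring
      rw [h1]
      calc psum K ((q * M + s) + M)
          ≡ psum K (q * M + s) + psum K M [ZMOD (M : Int)] := psum_add_block K M _
        _ ≡ ((q : Int) * psum K M + psum K s) + psum K M [ZMOD (M : Int)] := (ih s).add (Int.ModEq.refl _)
        _ = ((q : Int) + 1) * psum K M + psum K s := by ring
        _ = (((q + 1 : Nat) : Int)) * psum K M + psum K s := by push_cast; ring

theorem modeq_of_modeq_natAbs {m x y : Int} (h : x ≡ y [ZMOD ((m.natAbs : Nat) : Int)]) :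
    x ≡ y [ZMOD m] :=
  Int.modEq_iff_dvd.mpr (Int.natAbs_dvd.mp (Int.modEq_iff_dvd.mp h))

-- exact division: (b*v) // b = v for b > 0
theorem floordiv_mul_cancel {b : Int} (v : Int) (hb : 0 < b) :
    PySem.Int.floordiv (b * v) b = v := by
  rw [PySem.Int.floordiv_eq_iff_of_pos hb]
  constructor <;> nlinarith

theorem three_dvd_sq_sum_num (n : Int) : (3 : Int) ∣ n * (n + 1) * (2 * n + 1) := by
  have h : ∀ x : ZMod 3, x * (x + 1) * (2 * x + 1) = 0 := by decide
  have := (ZMod.intCast_zmod_eq_zero_iff_dvd (n * (n + 1) * (2 * n + 1)) 3).mp (by push_cast; exact h (n : ZMod 3))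
  exact_mod_cast this

-- A's one-shot sum-of-squares division agrees with B's staged one.
theorem k2_branch_eq (n : Int) :
    PySem.Int.floordiv (n * (n + 1) * (2 * n + 1)) 6
      = PySem.Int.floordiv (PySem.Int.floordiv (n * (n + 1)) 2 * (2 * n + 1)) 3 := by
  obtain ⟨u, hu⟩ := Int.even_mul_succ_self n
  have hu2 : n * (n + 1) = 2 * u := by omega
  have h3 : (3 : Int) ∣ u * (2 * n + 1) := by
    have h := three_dvd_sq_sum_num n
    rw [hu2] at h
    have h2 : (3 : Int) ∣ 2 * (u * (2 * n + 1)) := by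
      have : 2 * u * (2 * n + 1) = 2 * (u * (2 * n + 1)) := by ring
      rwa [this] at h
    exact (Int.Prime.dvd_mul' (by norm_num) h2).resolve_left (by norm_num)
  obtain ⟨v, hv⟩ := h3
  have e1 : n * (n + 1) * (2 * n + 1) = 6 * v := by
    rw [hu2]; nlinarith
  rw [e1, hu2, floordiv_mul_cancel u (by norm_num), hv,
    floordiv_mul_cancel v (by norm_num), floordiv_mul_cancel v (by norm_num)]

theorem k2_branch_eq_div (n : Int) :
    n * (n + 1) * (2 * n + 1) / 6 = n * (n + 1) / 2 * (2 * n + 1) / 3 := by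
  have h := k2_branch_eq n
  rw [PySem.Int.floordiv_eq_ediv_of_pos (by norm_num), PySem.Int.floordiv_eq_ediv_of_pos (by norm_num),
    PySem.Int.floordiv_eq_ediv_of_pos (by norm_num)] at h
  exact h

-- A reduces the triangular number before squaring, B squares first; same residue.
theorem k3_branch_eq (t m : Int) (hm : m ≠ 0) :
    PySem.Int.mod (PySem.Int.mod t m * PySem.Int.mod t m) m = PySem.Int.mod (t * t) m :=
  pymod_eq_of_modeq hm ((pymod_modeq_self t m).mul (pymod_modeq_self t m))

theorem bucket_eq (n k mod : Int) (hm : mod ≠ 0) (hn : 1 ≤ n) :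
    (PySem.List.pyRange 1 (n + 1) 1).foldl
      (fun result i => PySem.Int.mod (result + PySem.Int.powMod i k.toNat mod) mod) 0
    = PySem.Int.mod
        (if PySem.Int.floordiv n |mod| ≠ 0 then
          ((PySem.List.pyRange 1 (PySem.Int.mod n |mod| + 1) 1).map
              (fun i => PySem.Int.powMod i k.toNat mod)).sum
            + PySem.Int.floordiv n |mod| *
              ((PySem.List.pyRange 1 (|mod| + 1) 1).map
                (fun i => PySem.Int.powMod i k.toNat mod)).sum
         else
          ((PySem.List.pyRange 1 (PySem.Int.mod n |mod| + 1) 1).map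
              (fun i => PySem.Int.powMod i k.toNat mod)).sum) mod := by
  have habs : |mod| = ((mod.natAbs : Nat) : Int) := Int.abs_eq_natAbs mod
  have hM : 0 < mod.natAbs := Int.natAbs_pos.mpr hm
  have hN : n = ((n.toNat : Nat) : Int) := (Int.toNat_of_nonneg (by omega)).symm
  have hq : PySem.Int.floordiv n |mod| = ((n.toNat / mod.natAbs : Nat) : Int) := by
    rw [habs, hN]; exact_mod_cast PySem.Int.floordiv_natCast n.toNat mod.natAbs
  have hr : PySem.Int.mod n |mod| = ((n.toNat % mod.natAbs : Nat) : Int) := by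
    rw [habs, hN]; exact_mod_cast PySem.Int.mod_natCast n.toNat mod.natAbs
  rw [foldl_pymod_zero k.toNat mod hm, pyRange_pow_sum k.toNat n (by omega)]
  have hcollapse :
      (if PySem.Int.floordiv n |mod| ≠ 0 then
          ((PySem.List.pyRange 1 (PySem.Int.mod n |mod| + 1) 1).map
              (fun i => PySem.Int.powMod i k.toNat mod)).sum
            + PySem.Int.floordiv n |mod| *
              ((PySem.List.pyRange 1 (|mod| + 1) 1).map
                (fun i => PySem.Int.powMod i k.toNat mod)).sum
        else
          ((PySem.List.pyRange 1 (PySem.Int.mod n |mod| + 1) 1).map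
              (fun i => PySem.Int.powMod i k.toNat mod)).sum)
      = ((PySem.List.pyRange 1 (PySem.Int.mod n |mod| + 1) 1).map
              (fun i => PySem.Int.powMod i k.toNat mod)).sum
            + PySem.Int.floordiv n |mod| *
              ((PySem.List.pyRange 1 (|mod| + 1) 1).map
                (fun i => PySem.Int.powMod i k.toNat mod)).sum := by
    by_cases hq0 : PySem.Int.floordiv n |mod| ≠ 0
    · rw [if_pos hq0]
    · rw [if_neg hq0]
      have hz : PySem.Int.floordiv n |mod| = 0 := not_not.mp hq0
      rw [hz]; ring
  rw [hcollapse]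
  apply pymod_eq_of_modeq hm
  have hP : ((PySem.List.pyRange 1 (PySem.Int.mod n |mod| + 1) 1).map
      (fun i => PySem.Int.powMod i k.toNat mod)).sum
      ≡ psum k.toNat (n.toNat % mod.natAbs) [ZMOD mod] := by
    refine (sum_map_powmod_modeq k.toNat mod _).trans ?_
    rw [hr, pyRange_pow_sum k.toNat _ (by positivity), Int.toNat_natCast]
  have hB : ((PySem.List.pyRange 1 (|mod| + 1) 1).map
      (fun i => PySem.Int.powMod i k.toNat mod)).sum
      ≡ psum k.toNat mod.natAbs [ZMOD mod] := by
    refine (sum_map_powmod_modeq k.toNat mod _).trans ?_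
    rw [habs, pyRange_pow_sum k.toNat _ (by positivity), Int.toNat_natCast]
  have hQB := hB.mul_left ((n.toNat / mod.natAbs : Nat) : Int)
  have hdecomp : n.toNat / mod.natAbs * mod.natAbs + n.toNat % mod.natAbs = n.toNat := by
    rw [mul_comm]; exact Nat.div_add_mod n.toNat mod.natAbs
  have hsum : psum k.toNat n.toNat
      ≡ psum k.toNat (n.toNat % mod.natAbs)
        + ((n.toNat / mod.natAbs : Nat) : Int) * psum k.toNat mod.natAbs [ZMOD mod] := by
    have h1 := psum_blocks k.toNat mod.natAbs (n.toNat / mod.natAbs) (n.toNat % mod.natAbs)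
    rw [hdecomp] at h1
    refine (modeq_of_modeq_natAbs h1).trans ?_
    have : ((n.toNat / mod.natAbs : Nat) : Int) * psum k.toNat mod.natAbs
        + psum k.toNat (n.toNat % mod.natAbs)
        = psum k.toNat (n.toNat % mod.natAbs)
          + ((n.toNat / mod.natAbs : Nat) : Int) * psum k.toNat mod.natAbs := by ring
    rw [this]
  rw [hq]
  exact hsum.trans (hP.add hQB).symm

-- ===== VERDICT (by name: the statement is the Claim_ definition above) =====
theorem sum_powers_spec : Claim_equal_sum_powers := by
  intro n k mod _ hpre
  obtain ⟨hk, hm⟩ := hpre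
  unfold Spec_sum_powers sum_powers sum_powers_alt
  rw [if_neg (by omega : ¬ k < 0)]
  by_cases h0 : k = 0
  · simp [h0]
  by_cases h1 : k = 1
  · simp [h1]
  by_cases h2 : k = 2
  · simp [h2]
    rw [k2_branch_eq_div]
  by_cases h3 : k = 3
  · simp [h3, k3_branch_eq _ _ hm]
  simp only [h0, h1, h2, h3, if_false]
  rw [if_neg (by omega : ¬ k ≤ 3)]
  by_cases hn : n < 1
  · rw [if_pos hn, PySem.List.pyRange_one_eq_nil (by omega : n + 1 ≤ 1)]
    rfl
  · rw [if_neg hn]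
    exact bucket_eq n k mod hm (by omega)
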